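-- pv_equiv track=rewrite | github.com/ShivaPriyanShanmuga/Leetcode | 2085. Count Common Words With One Occurence.py | countWords
-- ===== SOURCE A (Python) =====
-- def countWords(words1, words2):
--     hashmap = {}
--     ct = 0
--     for i in words1:
--         if i in hashmap:
--             hashmap[i][0] += 1
--         else:
--             hashmap[i] = [1, 0]
--     for i in words2:
--         if i in hashmap:
--             hashmap[i][1] += 1
--         else:
--             pass
--     for i in hashmap:
--         if hashmap[i] == [1, 1]:
--             ct += 1
--     return ct
-- ===== SOURCE B (Python) =====
-- def _singles(ws):
--     # sort, then collect words whose run has length exactly 1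
--     s = sorted(ws)
--     out = []
--     k = 0
--     n = len(s)
--     while k < n:
--         j = k + 1
--         while j < n and s[j] == s[k]:
--             j += 1
--         if j == k + 1:
--             out.append(s[k])
--         k = j
--     return out
--
--
-- def countWords(words1, words2):
--     u1 = _singles(words1)
--     u2 = _singles(words2)
--     i = j = 0
--     ct = 0
--     while i < len(u1) and j < len(u2):
--         if u1[i] < u2[j]:
--             i += 1
--         elif u2[j] < u1[i]:
--             j += 1
--         else:
--             ct += 1
--             i += 1
--             j += 1
--     return ct
-- ===== Notes on version B (the rewrite author's own statement) =====
-- stated objective: alternative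
-- what changed: B uses no hash table at all: it sorts each list, extracts the exactly-once words by a run-length scan over the sorted list, and counts the common ones with a two-pointer merge join over the two sorted unique lists.
import Mathlib
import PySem

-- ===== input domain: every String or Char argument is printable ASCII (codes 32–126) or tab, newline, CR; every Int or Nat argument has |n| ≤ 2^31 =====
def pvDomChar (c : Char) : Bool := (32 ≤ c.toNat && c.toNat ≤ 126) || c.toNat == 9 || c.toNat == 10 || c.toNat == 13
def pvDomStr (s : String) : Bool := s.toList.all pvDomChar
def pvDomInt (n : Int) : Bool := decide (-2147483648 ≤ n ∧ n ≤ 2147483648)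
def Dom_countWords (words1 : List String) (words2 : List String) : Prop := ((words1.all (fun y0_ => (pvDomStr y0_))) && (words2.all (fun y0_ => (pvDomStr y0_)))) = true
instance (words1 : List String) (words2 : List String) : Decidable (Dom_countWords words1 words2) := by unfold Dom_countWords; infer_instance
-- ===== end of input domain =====

-- B uses no hash table: it sorts each list, extracts the exactly-once words by a run-length
-- scan of the sorted list, and counts common ones with a two-pointer merge join; same result,
-- a different (sort-based) algorithm, not faster.

-- ===== PORT A =====
def countWords (words1 : List String) (words2 : List String) : Int :=
  let hashmap : PySem.Dict String (Int × Int) :=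
    words1.foldl (fun d i =>
      if d.contains i then
        d.insert i ((d.getD i ((0:Int),(0:Int))).1 + 1, (d.getD i ((0:Int),(0:Int))).2)
      else
        d.insert i (1, 0)) PySem.Dict.empty
  let hashmap2 : PySem.Dict String (Int × Int) :=
    words2.foldl (fun d i =>
      if d.contains i then
        d.insert i ((d.getD i ((0:Int),(0:Int))).1, (d.getD i ((0:Int),(0:Int))).2 + 1)
      else
        d) hashmap
  hashmap2.keys.foldl (fun ct i =>
    if hashmap2.getD i ((0:Int),(0:Int)) = (1, 1) then ct + 1 else ct) (0 : Int)

-- ===== PORT B =====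
-- inner while loop of _singles: consume the run of the head element; keep the head iff the run has length 1
def pvSinglesGo : List String → List String
  | [] => []
  | x :: xs =>
    if xs.takeWhile (fun y => y == x) = [] then
      x :: pvSinglesGo (xs.dropWhile (fun y => y == x))
    else
      pvSinglesGo (xs.dropWhile (fun y => y == x))
termination_by l => l.length
decreasing_by
  · have := List.length_dropWhile_le (fun y => y == x) xs; simp; omega
  · have := List.length_dropWhile_le (fun y => y == x) xs; simp; omega

def pvSingles (ws : List String) : List String :=
  pvSinglesGo (PySem.List.sorted ws (fun x => x) false)

-- the two-pointer while loop of countWords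
def pvMergeCount : List String → List String → Int
  | [], _ => 0
  | _ :: _, [] => 0
  | x :: xs, y :: ys =>
    if x < y then pvMergeCount xs (y :: ys)
    else if y < x then pvMergeCount (x :: xs) ys
    else pvMergeCount xs ys + 1
termination_by a b => a.length + b.length

def countWords_alt (words1 : List String) (words2 : List String) : Int :=
  pvMergeCount (pvSingles words1) (pvSingles words2)

-- ===== PRECONDITION & SPEC =====
def Spec_countWords (words1 : List String) (words2 : List String) (out : Int) : Prop := out = countWords_alt words1 words2
instance (words1 : List String) (words2 : List String) (out : Int) : Decidable (Spec_countWords words1 words2 out) := by unfold Spec_countWords; infer_instance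

-- ===== CLAIM (what is proved, stated in full; the proofs are below) =====
def Claim_equal_countWords : Prop := ∀ (words1 : List String) (words2 : List String), Dom_countWords words1 words2 → Spec_countWords words1 words2 (countWords words1 words2)

-- ===== LEMMAS AND PROOFS =====

-- counting loop = countP
theorem foldl_count_if (l : List String) (p : String → Prop) [DecidablePred p] (a : Int) :
    l.foldl (fun ct i => if p i then ct + 1 else ct) a = a + l.countP (fun i => decide (p i)) := by
  induction l generalizing a with
  | nil => simp
  | cons x l ih =>
    simp only [List.foldl_cons, List.countP_cons, ih]
    by_cases h : p x <;> simp [h, add_assoc, add_comm]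

-- A's first loop, uniform step
theorem stepA1_eq (d : PySem.Dict String (Int × Int)) (i : String) :
    (if d.contains i then
        d.insert i ((d.getD i ((0:Int),(0:Int))).1 + 1, (d.getD i ((0:Int),(0:Int))).2)
      else d.insert i (1, 0))
    = d.insert i ((d.getD i ((0:Int),(0:Int))).1 + 1, (d.getD i ((0:Int),(0:Int))).2) := by
  by_cases h : d.contains i = true
  · simp [h]
  · have h' : d.contains i = false := by revert h; cases d.contains i <;> simp
    simp [h', PySem.Dict.getD_of_not_contains _ _ h']

theorem foldA1_getD (l : List String) (d : PySem.Dict String (Int × Int)) (v : String) :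
    (l.foldl (fun d i => d.insert i ((d.getD i ((0:Int),(0:Int))).1 + 1, (d.getD i ((0:Int),(0:Int))).2)) d).getD v ((0:Int),(0:Int))
      = ((d.getD v ((0:Int),(0:Int))).1 + l.count v, (d.getD v ((0:Int),(0:Int))).2) := by
  induction l generalizing d with
  | nil => simp
  | cons x l ih =>
    simp only [List.foldl_cons, ih, PySem.Dict.getD_insert, List.count_cons]
    by_cases h : v = x
    · subst h; simp; ring
    · have hx : ¬x = v := fun e => h e.symm
      have hb : (v == x) = false := by simp [h]
      simp [h, hx]

theorem foldA1_keys (l : List String) :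
    (l.foldl (fun d i => d.insert i ((d.getD i ((0:Int),(0:Int))).1 + 1, (d.getD i ((0:Int),(0:Int))).2)) PySem.Dict.empty).keys
      = PySem.Set.ofList l := by
  rw [PySem.Dict.keys_foldl_insert]
  simp [PySem.Set.update_nil_left]

-- A's second loop: keys preserved, getD characterised
theorem stepA2_keys (d : PySem.Dict String (Int × Int)) (x : String) :
    (if d.contains x then
        d.insert x ((d.getD x ((0:Int),(0:Int))).1, (d.getD x ((0:Int),(0:Int))).2 + 1)
      else d).keys = d.keys := by
  by_cases h : d.contains x = true
  · simp [h, PySem.Dict.keys_insert_of_contains _ _ h]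
  · simp [h]

theorem foldA2_keys (l : List String) (d : PySem.Dict String (Int × Int)) :
    (l.foldl (fun d i => if d.contains i then
        d.insert i ((d.getD i ((0:Int),(0:Int))).1, (d.getD i ((0:Int),(0:Int))).2 + 1)
      else d) d).keys = d.keys := by
  induction l generalizing d with
  | nil => simp
  | cons x l ih =>
    simp only [List.foldl_cons, ih, stepA2_keys]

theorem foldA2_getD (l : List String) (d : PySem.Dict String (Int × Int)) (v : String) :
    (l.foldl (fun d i => if d.contains i then
        d.insert i ((d.getD i ((0:Int),(0:Int))).1, (d.getD i ((0:Int),(0:Int))).2 + 1)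
      else d) d).getD v ((0:Int),(0:Int))
      = ((d.getD v ((0:Int),(0:Int))).1,
         (d.getD v ((0:Int),(0:Int))).2 + if d.contains v then (l.count v : Int) else 0) := by
  induction l generalizing d with
  | nil => simp
  | cons x l ih =>
    simp only [List.foldl_cons, ih]
    have hk : ∀ w, (if d.contains x then
        d.insert x ((d.getD x ((0:Int),(0:Int))).1, (d.getD x ((0:Int),(0:Int))).2 + 1)
      else d).contains w = d.contains w := by
      intro w
      by_cases h : d.contains x = true
      · simp only [h, if_true]
        rw [PySem.Dict.contains_eq_decide_mem_keys, PySem.Dict.contains_eq_decide_mem_keys]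
        rw [PySem.Dict.keys_insert_of_contains _ _ h]
      · simp [h]
    rw [hk]
    by_cases h : d.contains x = true
    · simp only [h, if_true, PySem.Dict.getD_insert]
      by_cases hv : v = x
      · subst hv
        simp [h]
        ring
      · have hx : ¬x = v := fun e => hv e.symm
        have hb : (v == x) = false := by simp [hv]
        simp only [if_neg hv]
        by_cases hc : d.contains v = true <;>
          simp [hc, hx]
    · have h' : d.contains x = false := by revert h; cases d.contains x <;> simp
      simp only [h', Bool.false_eq_true, if_false]
      by_cases hv : v = x
      · subst hv; simp [h']
      · have hx : ¬x = v := fun e => hv e.symm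
        by_cases hc : d.contains v = true <;>
          simp [hc, hx]

-- A as a countP over the distinct words of words1
theorem countWords_eq_countP (words1 words2 : List String) :
    countWords words1 words2
      = ((PySem.Set.ofList words1).countP
          (fun v => decide (words1.count v = 1 ∧ words2.count v = 1)) : Int) := by
  unfold countWords
  have hstep : (fun (d : PySem.Dict String (Int × Int)) i =>
      if d.contains i then
        d.insert i ((d.getD i ((0:Int),(0:Int))).1 + 1, (d.getD i ((0:Int),(0:Int))).2)
      else d.insert i (1, 0))
    = (fun d i => d.insert i ((d.getD i ((0:Int),(0:Int))).1 + 1, (d.getD i ((0:Int),(0:Int))).2)) := by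
    funext d i; exact stepA1_eq d i
  rw [hstep]
  simp only []
  set h1 := words1.foldl (fun d i => d.insert i ((d.getD i ((0:Int),(0:Int))).1 + 1, (d.getD i ((0:Int),(0:Int))).2)) PySem.Dict.empty with hh1
  set h2 := words2.foldl (fun d i => if d.contains i then
        d.insert i ((d.getD i ((0:Int),(0:Int))).1, (d.getD i ((0:Int),(0:Int))).2 + 1)
      else d) h1 with hh2
  have hkeys1 : h1.keys = PySem.Set.ofList words1 := foldA1_keys words1
  have hkeys : h2.keys = PySem.Set.ofList words1 := by
    rw [hh2, foldA2_keys, hkeys1]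
  rw [foldl_count_if, hkeys]
  have hcongr : (PySem.Set.ofList words1).countP (fun i => decide (h2.getD i ((0:Int),(0:Int)) = (1,1)))
      = (PySem.Set.ofList words1).countP (fun v => decide (words1.count v = 1 ∧ words2.count v = 1)) := by
    apply List.countP_congr
    intro v hv
    have hmem : v ∈ words1 := (PySem.Set.mem_ofList _ _).1 hv
    have hcont : h1.contains v = true := by
      rw [PySem.Dict.contains_eq_decide_mem_keys, hkeys1]
      simp [PySem.Set.mem_ofList, hmem]
    have hg1 : h1.getD v ((0:Int),(0:Int)) = ((words1.count v : Int), 0) := by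
      rw [hh1, foldA1_getD]
      simp
    have hg2 : h2.getD v ((0:Int),(0:Int)) = ((words1.count v : Int), (words2.count v : Int)) := by
      rw [hh2, foldA2_getD, hg1, hcont]
      simp
    rw [hg2]
    simp only [Prod.mk.injEq, decide_eq_true_eq]
    constructor
    · rintro ⟨a, b⟩; omega
    · rintro ⟨a, b⟩; omega
  rw [hcongr]
  simp

-- B-side lemmas -----------------------------------------------------------

-- in a ≤-sorted list x :: xs, every element surviving the x-run is strictly greater than x
theorem lt_of_mem_dropWhile_sorted (x : String) (xs : List String)
    (h : (x :: xs).Pairwise (· ≤ ·)) :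
    ∀ w ∈ xs.dropWhile (fun y => y == x), x < w := by
  induction xs with
  | nil => simp
  | cons y ys ih =>
    intro w hw
    by_cases hyx : y = x
    · subst hyx
      simp only [List.dropWhile_cons, beq_self_eq_true, if_true] at hw
      have h' : (y :: ys).Pairwise (· ≤ ·) := h.tail
      exact ih h' w hw
    · have hb : (y == x) = false := by simp [hyx]
      simp only [List.dropWhile_cons, hb, Bool.false_eq_true, if_false] at hw
      have hxy : x ≤ y := (List.pairwise_cons.1 h).1 y (by simp)
      have hxylt : x < y := lt_of_le_of_ne hxy (fun e => hyx e.symm)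
      rcases List.mem_cons.1 hw with rfl | hw'
      · exact hxylt
      · have hyw : y ≤ w := (List.pairwise_cons.1 h.tail).1 w hw'
        exact lt_of_lt_of_le hxylt hyw

theorem not_mem_dropWhile_sorted (x : String) (xs : List String)
    (h : (x :: xs).Pairwise (· ≤ ·)) :
    x ∉ xs.dropWhile (fun y => y == x) := by
  intro hx
  exact lt_irrefl x (lt_of_mem_dropWhile_sorted x xs h x hx)

-- count in a sorted x :: xs, split by the run of x
theorem count_cons_run (x : String) (xs : List String)
    (h : (x :: xs).Pairwise (· ≤ ·)) (w : String) :
    (x :: xs).count w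
      = if w = x then 1 + (xs.takeWhile (fun y => y == x)).length
        else (xs.dropWhile (fun y => y == x)).count w := by
  have hsplit : xs = xs.takeWhile (fun y => y == x) ++ xs.dropWhile (fun y => y == x) :=
    (List.takeWhile_append_dropWhile (p := fun y => y == x) (l := xs)).symm
  have htake : ∀ z ∈ xs.takeWhile (fun y => y == x), z = x := by
    intro z hz
    have := List.mem_takeWhile_imp hz
    simpa using this
  by_cases hw : w = x
  · subst hw
    have h0 : (xs.dropWhile (fun y => y == w)).count w = 0 :=
      List.count_eq_zero.2 (not_mem_dropWhile_sorted w xs h)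
    have h1 : (xs.takeWhile (fun y => y == w)).count w
        = (xs.takeWhile (fun y => y == w)).length :=
      List.count_eq_length.2 (fun z hz => by rw [htake z hz])
    rw [if_pos rfl]
    calc (w :: xs).count w = xs.count w + 1 := by simp
      _ = 1 + (xs.takeWhile (fun y => y == w)).length := by
          conv_lhs => rw [hsplit]
          rw [List.count_append, h0, h1]; omega
  · have ht0 : (xs.takeWhile (fun y => y == x)).count w = 0 :=
      List.count_eq_zero.2 (fun hmem => hw (htake w hmem))
    rw [if_neg hw]
    calc (x :: xs).count w = xs.count w := by
          simp only [List.count_cons]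
          have : ¬ x = w := fun e => hw e.symm
          simp [this]
      _ = (xs.dropWhile (fun y => y == x)).count w := by
          conv_lhs => rw [hsplit]
          rw [List.count_append, ht0]; omega

-- membership in pvSinglesGo of a sorted list = appearing exactly once
theorem mem_pvSinglesGo (s : List String) (h : s.Pairwise (· ≤ ·)) (w : String) :
    w ∈ pvSinglesGo s ↔ s.count w = 1 := by
  induction s using pvSinglesGo.induct with
  | case1 => simp [pvSinglesGo]
  | case2 x xs ht ih =>
    have hr : (xs.dropWhile (fun y => y == x)).Pairwise (· ≤ ·) :=
      h.tail.sublist (List.dropWhile_sublist _)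
    rw [pvSinglesGo, if_pos ht, count_cons_run x xs h w]
    by_cases hw : w = x
    · subst hw
      have hx : w ∉ xs.dropWhile (fun y => y == w) := not_mem_dropWhile_sorted w xs h
      have : w ∉ pvSinglesGo (xs.dropWhile (fun y => y == w)) := by
        intro hmem
        exact hx (List.count_pos_iff.1 (by rw [(ih hr).1 hmem]; omega))
      simp [ht, this]
    · have hne : ¬ (w = x) := hw
      simp only [List.mem_cons, hne, false_or]
      exact ih hr
  | case3 x xs ht ih =>
    have hr : (xs.dropWhile (fun y => y == x)).Pairwise (· ≤ ·) :=
      h.tail.sublist (List.dropWhile_sublist _)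
    rw [pvSinglesGo, if_neg ht, count_cons_run x xs h w]
    by_cases hw : w = x
    · subst hw
      have hx : w ∉ xs.dropWhile (fun y => y == w) := not_mem_dropWhile_sorted w xs h
      have hnm : w ∉ pvSinglesGo (xs.dropWhile (fun y => y == w)) := by
        intro hmem
        exact hx (List.count_pos_iff.1 (by rw [(ih hr).1 hmem]; omega))
      have hlen : (xs.takeWhile (fun y => y == w)).length ≠ 0 := by
        intro h0
        exact ht (List.length_eq_zero_iff.1 h0)
      rw [if_pos rfl]
      constructor
      · intro hmem; exact absurd hmem hnm
      · intro he; exfalso; omega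
    · simp only [if_neg hw]
      exact ih hr

-- pvSinglesGo of a sorted list is strictly increasing
theorem pairwise_lt_pvSinglesGo (s : List String) (h : s.Pairwise (· ≤ ·)) :
    (pvSinglesGo s).Pairwise (· < ·) := by
  induction s using pvSinglesGo.induct with
  | case1 => simp [pvSinglesGo]
  | case2 x xs ht ih =>
    have hr : (xs.dropWhile (fun y => y == x)).Pairwise (· ≤ ·) :=
      h.tail.sublist (List.dropWhile_sublist _)
    rw [pvSinglesGo, if_pos ht]
    refine List.pairwise_cons.2 ⟨?_, ih hr⟩
    intro w hw
    have hwr : w ∈ xs.dropWhile (fun y => y == x) :=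
      List.count_pos_iff.1 (by rw [(mem_pvSinglesGo _ hr w).1 hw]; omega)
    exact lt_of_mem_dropWhile_sorted x xs h w hwr
  | case3 x xs ht ih =>
    have hr : (xs.dropWhile (fun y => y == x)).Pairwise (· ≤ ·) :=
      h.tail.sublist (List.dropWhile_sublist _)
    rw [pvSinglesGo, if_neg ht]
    exact ih hr

-- the merge join over strictly increasing lists counts common elements
theorem pvMergeCount_eq_countP (u1 u2 : List String)
    (h1 : u1.Pairwise (· < ·)) (h2 : u2.Pairwise (· < ·)) :
    pvMergeCount u1 u2 = (u1.countP (fun w => decide (w ∈ u2)) : Int) := by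
  induction u1, u2 using pvMergeCount.induct with
  | case1 u2 => simp [pvMergeCount]
  | case2 x xs => simp [pvMergeCount]
  | case3 x xs y ys hxy ih =>
    rw [pvMergeCount, if_pos hxy]
    have hnm : x ∉ y :: ys := by
      intro hx
      rcases List.mem_cons.1 hx with rfl | hx'
      · exact lt_irrefl x hxy
      · have : y < x := (List.pairwise_cons.1 h2).1 x hx'
        exact lt_irrefl x (lt_trans hxy this)
    rw [ih h1.tail h2]
    simp only [List.mem_cons, not_or] at hnm
    simp [hnm.1, hnm.2]
  | case4 x xs y ys hxy hyx ih =>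
    rw [pvMergeCount, if_neg hxy, if_pos hyx]
    rw [ih h1 h2.tail]
    have : (x :: xs).countP (fun w => decide (w ∈ ys))
        = (x :: xs).countP (fun w => decide (w ∈ y :: ys)) := by
      apply List.countP_congr
      intro w hw
      have hwy : y < w := by
        rcases List.mem_cons.1 hw with rfl | hw'
        · exact hyx
        · exact lt_trans hyx ((List.pairwise_cons.1 h1).1 w hw')
      have hne : ¬ (w = y) := fun e => lt_irrefl y (e ▸ hwy)
      simp [List.mem_cons, hne]
    rw [this]
  | case5 x xs y ys hxy hyx ih =>
    have hxy' : x = y := le_antisymm (not_lt.1 hyx) (not_lt.1 hxy)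
    subst hxy'
    rw [pvMergeCount, if_neg hxy, if_neg hyx]
    rw [ih h1.tail h2.tail]
    have : xs.countP (fun w => decide (w ∈ ys))
        = xs.countP (fun w => decide (w ∈ x :: ys)) := by
      apply List.countP_congr
      intro w hw
      have hwx : x < w := (List.pairwise_cons.1 h1).1 w hw
      have hne : ¬ (w = x) := fun e => lt_irrefl x (e ▸ hwx)
      simp [List.mem_cons, hne]
    rw [this]
    simp

-- pvSingles facts against the original (unsorted) list
theorem sorted_pairwise_le (ws : List String) :
    (PySem.List.sorted ws (fun x => x) false).Pairwise (· ≤ ·) := by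
  have := PySem.List.sorted_pairwise (xs := ws) (key := fun x => x)
  simpa using this

theorem mem_pvSingles (ws : List String) (w : String) :
    w ∈ pvSingles ws ↔ ws.count w = 1 := by
  unfold pvSingles
  rw [mem_pvSinglesGo _ (sorted_pairwise_le ws) w]
  have hperm : (PySem.List.sorted ws (fun x => x) false).Perm ws :=
    PySem.List.sorted_perm ws (fun x => x) false
  rw [hperm.count_eq]

theorem pairwise_lt_pvSingles (ws : List String) :
    (pvSingles ws).Pairwise (· < ·) :=
  pairwise_lt_pvSinglesGo _ (sorted_pairwise_le ws)

-- B as the same countP as A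
theorem countWords_alt_eq_countP (words1 words2 : List String) :
    countWords_alt words1 words2
      = ((PySem.Set.ofList words1).countP
          (fun v => decide (words1.count v = 1 ∧ words2.count v = 1)) : Int) := by
  unfold countWords_alt
  rw [pvMergeCount_eq_countP _ _ (pairwise_lt_pvSingles words1) (pairwise_lt_pvSingles words2)]
  have hcongr : (pvSingles words1).countP (fun w => decide (w ∈ pvSingles words2))
      = (pvSingles words1).countP (fun v => decide (words1.count v = 1 ∧ words2.count v = 1)) := by
    apply List.countP_congr
    intro w hw
    have h1 : words1.count w = 1 := (mem_pvSingles words1 w).1 hw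
    simp [mem_pvSingles, h1]
  rw [hcongr]
  have hnd1 : (pvSingles words1).Nodup := (pairwise_lt_pvSingles words1).imp ne_of_lt
  have hnd2 : (PySem.Set.ofList words1).Nodup := PySem.Set.nodup_ofList words1
  have hperm : ((pvSingles words1).filter (fun v => decide (words1.count v = 1 ∧ words2.count v = 1))).Perm
      ((PySem.Set.ofList words1).filter (fun v => decide (words1.count v = 1 ∧ words2.count v = 1))) := by
    rw [List.perm_ext_iff_of_nodup (hnd1.filter _) (hnd2.filter _)]
    intro a
    simp only [List.mem_filter, decide_eq_true_eq, mem_pvSingles, PySem.Set.mem_ofList]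
    constructor
    · rintro ⟨h1, hc1, hc2⟩
      exact ⟨List.count_pos_iff.1 (by omega), hc1, hc2⟩
    · rintro ⟨_, hc1, hc2⟩
      exact ⟨hc1, hc1, hc2⟩
  rw [List.countP_eq_length_filter, List.countP_eq_length_filter, hperm.length_eq]

-- ===== VERDICT (by name: the statement is the Claim_ definition above) =====
theorem countWords_spec : Claim_equal_countWords := by
  intro words1 words2 _
  unfold Spec_countWords
  rw [countWords_eq_countP, countWords_alt_eq_countP]
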